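-- pv_equiv track=rewrite | github.com/Ferox-x/pet-games | app/services/code_database.py | _get_sorted_tickets
-- ===== SOURCE A (Python) =====
-- def _get_sorted_tickets(tickets):
--
--     open_tickets = list()
--     in_progress_tickets = list()
--     closed_tickets = list()
--
--     for ticket in tickets:
--         if ticket.get('status') == 'OP':
--             open_tickets.append(ticket)
--         elif ticket.get('status') == 'IP':
--             in_progress_tickets.append(ticket)
--         elif ticket.get('status') == 'CL':
--             closed_tickets.append(ticket)
--
--     sorted_tickets = {
--         'op': open_tickets,
--         'ip': in_progress_tickets,
--         'cl': closed_tickets,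
--     }
--
--     return sorted_tickets
-- ===== SOURCE B (Python) =====
-- def _get_sorted_tickets(tickets):
--     return {
--         'op': [t for t in tickets if t.get('status') == 'OP'],
--         'ip': [t for t in tickets if t.get('status') == 'IP'],
--         'cl': [t for t in tickets if t.get('status') == 'CL'],
--     }
-- ===== Notes on version B (the rewrite author's own statement) =====
-- stated objective: simpler
-- what changed: Replaces the single-pass loop with three mutable accumulators and if/elif dispatch by a dict literal of three filtering comprehensions, one per status.
import Mathlib
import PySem

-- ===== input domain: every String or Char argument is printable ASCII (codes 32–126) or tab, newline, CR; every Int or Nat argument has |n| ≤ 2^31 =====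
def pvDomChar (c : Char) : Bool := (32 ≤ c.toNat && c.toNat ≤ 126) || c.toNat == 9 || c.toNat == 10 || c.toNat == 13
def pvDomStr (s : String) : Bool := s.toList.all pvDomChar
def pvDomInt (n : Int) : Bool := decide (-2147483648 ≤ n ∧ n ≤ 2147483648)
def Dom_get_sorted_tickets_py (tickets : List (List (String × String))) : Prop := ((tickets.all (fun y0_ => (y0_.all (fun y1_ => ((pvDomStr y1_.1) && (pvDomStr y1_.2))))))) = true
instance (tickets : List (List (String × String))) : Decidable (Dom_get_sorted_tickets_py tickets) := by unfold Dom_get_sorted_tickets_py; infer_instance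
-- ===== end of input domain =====

-- B replaces the one-pass if/elif accumulator loop by three filtering comprehensions (objective: simpler).
-- ===== PORT A =====
def pvStatus (t : List (String × String)) : Option String :=
  PySem.Dict.get? (PySem.Dict.mk t) "status"

-- loop body of A: if/elif dispatch appending to one of the three accumulators
def pvStep (acc : List (List (String × String)) × List (List (String × String)) × List (List (String × String)))
    (ticket : List (String × String)) :
    List (List (String × String)) × List (List (String × String)) × List (List (String × String)) :=
  if pvStatus ticket == some "OP" then (acc.1 ++ [ticket], acc.2.1, acc.2.2)
  else if pvStatus ticket == some "IP" then (acc.1, acc.2.1 ++ [ticket], acc.2.2)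
  else if pvStatus ticket == some "CL" then (acc.1, acc.2.1, acc.2.2 ++ [ticket])
  else acc

-- one pass; three accumulators, as in A
def get_sorted_tickets_py (tickets : List (List (String × String))) : List (String × List (List (String × String))) :=
  let acc := tickets.foldl pvStep ([], [], [])
  [("op", acc.1), ("ip", acc.2.1), ("cl", acc.2.2)]

-- ===== PORT B =====
-- three filtering comprehensions, one per status, as in Source B
def get_sorted_tickets_py_alt (tickets : List (List (String × String))) : List (String × List (List (String × String))) :=
  [("op", tickets.filter (fun t => pvStatus t == some "OP")),
   ("ip", tickets.filter (fun t => pvStatus t == some "IP")),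
   ("cl", tickets.filter (fun t => pvStatus t == some "CL"))]

-- ===== PRECONDITION & SPEC =====
def Spec_get_sorted_tickets_py (tickets : List (List (String × String))) (out : List (String × List (List (String × String)))) : Prop := out = get_sorted_tickets_py_alt tickets
instance (tickets : List (List (String × String))) (out : List (String × List (List (String × String)))) : Decidable (Spec_get_sorted_tickets_py tickets out) := by unfold Spec_get_sorted_tickets_py; infer_instance

-- ===== CLAIM (what is proved, stated in full; the proofs are below) =====
def Claim_equal_get_sorted_tickets_py : Prop := ∀ (tickets : List (List (String × String))), Dom_get_sorted_tickets_py tickets → Spec_get_sorted_tickets_py tickets (get_sorted_tickets_py tickets)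

-- ===== LEMMAS AND PROOFS =====

-- ===== VERDICT (by name: the statement is the Claim_ definition above) =====
lemma pv_fold_inv (ts : List (List (String × String)))
    (o i c : List (List (String × String))) :
    ts.foldl pvStep (o, i, c)
    = (o ++ ts.filter (fun t => pvStatus t == some "OP"),
       i ++ ts.filter (fun t => pvStatus t == some "IP"),
       c ++ ts.filter (fun t => pvStatus t == some "CL")) := by
  induction ts generalizing o i c with
  | nil => simp
  | cons t ts ih =>
    simp only [List.foldl_cons, List.filter_cons]
    by_cases hO : pvStatus t = some "OP"
    · rw [show pvStep (o, i, c) t = (o ++ [t], i, c) from by simp [pvStep, hO], ih]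
      simp [hO]
    · by_cases hI : pvStatus t = some "IP"
      · rw [show pvStep (o, i, c) t = (o, i ++ [t], c) from by simp [pvStep, hI], ih]
        simp [hI]
      · by_cases hC : pvStatus t = some "CL"
        · rw [show pvStep (o, i, c) t = (o, i, c ++ [t]) from by simp [pvStep, hC], ih]
          simp [hC]
        · rw [show pvStep (o, i, c) t = (o, i, c) from by simp [pvStep, hO, hI, hC], ih]
          simp [hO, hI, hC]

theorem get_sorted_tickets_py_spec : Claim_equal_get_sorted_tickets_py := by
  intro tickets _
  unfold Spec_get_sorted_tickets_py get_sorted_tickets_py get_sorted_tickets_py_alt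
  rw [pv_fold_inv]
  simp
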